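-- pv_equiv track=rewrite | github.com/InnovateTheExisting/UTD | CS-6375-Machine-Learning/K-Means/TweetsClustering UsingKMeans.py | unionForJaccard
-- ===== SOURCE A (Python) =====
-- def unionForJaccard(set_one, set_two):
--     set_result = 0
--     for w in set_one:
--         if w in set_two:
--             set_result = set_result + max(set_one[w], set_two[w])
--             set_two.pop(w, None)
--         else:
--             set_result = set_result + set_one[w]
--     for w in set_two:
--         set_result = set_result + set_two[w]
--     return set_result
-- ===== SOURCE B (Python) =====
-- def unionForJaccard(set_one, set_two):
--     # grand total of both dicts, then subtract the smaller of each shared pair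
--     # (max(a, b) == a + b - min(a, b)); pops shared keys from set_two like the original
--     total = sum(set_one.values()) + sum(set_two.values())
--     for w, v in set_one.items():
--         if w in set_two:
--             total -= min(v, set_two.pop(w))
--     return total
-- ===== Notes on version B (the rewrite author's own statement) =====
-- stated objective: alternative
-- what changed: B computes the grand total of both dicts' values up front and then subtracts min(a,b) for each shared key (using the identity max(a,b)=a+b-min(a,b)), instead of A's interleaved add-max-or-add-own loop over set_one followed by a second sweep over the remainder of set_two; the same pop of shared keys from set_two is performed.
import Mathlib
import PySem

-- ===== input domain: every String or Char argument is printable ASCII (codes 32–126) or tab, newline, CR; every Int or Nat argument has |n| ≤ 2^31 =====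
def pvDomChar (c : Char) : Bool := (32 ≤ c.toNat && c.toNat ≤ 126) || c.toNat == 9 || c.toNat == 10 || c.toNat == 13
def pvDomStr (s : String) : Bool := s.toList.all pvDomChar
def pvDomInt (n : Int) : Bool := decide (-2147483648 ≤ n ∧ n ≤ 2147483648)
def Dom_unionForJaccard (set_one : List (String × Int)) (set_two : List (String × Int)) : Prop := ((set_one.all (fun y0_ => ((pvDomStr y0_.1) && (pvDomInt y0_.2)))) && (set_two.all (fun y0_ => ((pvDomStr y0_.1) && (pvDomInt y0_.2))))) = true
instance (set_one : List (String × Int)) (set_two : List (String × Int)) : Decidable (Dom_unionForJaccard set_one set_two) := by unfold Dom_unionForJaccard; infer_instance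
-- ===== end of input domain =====

-- B computes the grand total of both dicts' values up front and subtracts min(a,b) for each shared key
-- (max(a,b) = a + b - min(a,b)) instead of A's interleaved add-max-or-add-own loop plus a second sweep
-- (objective: alternative decomposition, same cost). Both Pythons pop the shared keys from set_two in
-- place; the equivalence proved here is about the RETURN value only (the mutation is identical in the
-- two Pythons but is not modelled by the ports).


-- ===== PORT A =====
-- 'res = 0; for w in set_one: if w in set_two: res += max(set_one[w], set_two[w]); set_two.pop(w, None)
--  else: res += set_one[w]' then 'for w in set_two: res += set_two[w]'.
-- set_one[w] / set_two[w] are only looked up at keys present in the respective dict, so the total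
-- getD with default 0 is exact there.
def unionForJaccard (set_one : List (String × Int)) (set_two : List (String × Int)) : Int :=
  let d1 : PySem.Dict String Int := PySem.Dict.mk set_one
  let st := d1.keys.foldl
    (fun (s : Int × PySem.Dict String Int) w =>
      if s.2.contains w then
        (s.1 + max (d1.getD w 0) (s.2.getD w 0), s.2.erase w)
      else
        (s.1 + d1.getD w 0, s.2))
    (0, PySem.Dict.mk set_two)
  st.2.keys.foldl (fun r w => r + st.2.getD w 0) st.1

-- ===== PORT B =====
-- 'total = sum(set_one.values()) + sum(set_two.values());
--  for w, v in set_one.items(): if w in set_two: total -= min(v, set_two.pop(w)); return total'.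
-- set_two.pop(w) is only reached when w is in set_two, so getD 0 + erase is exact there.
def unionForJaccard_alt (set_one : List (String × Int)) (set_two : List (String × Int)) : Int :=
  let d1 : PySem.Dict String Int := PySem.Dict.mk set_one
  let d2 : PySem.Dict String Int := PySem.Dict.mk set_two
  let total := d1.values.sum + d2.values.sum
  let st := d1.items.foldl
    (fun (s : Int × PySem.Dict String Int) p =>
      if s.2.contains p.1 then
        (s.1 - min p.2 (s.2.getD p.1 0), s.2.erase p.1)
      else
        s)
    (total, d2)
  st.1

-- ===== PRECONDITION & SPEC =====
-- The Python arguments are dicts, whose keys are necessarily distinct; Pre_ restricts the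
-- association-list encoding to exactly those lists (an assoc list with a duplicated key
-- represents no Python dict, so nothing is claimed there).
def Pre_unionForJaccard (set_one : List (String × Int)) (set_two : List (String × Int)) : Prop :=
  (set_one.map Prod.fst).Nodup ∧ (set_two.map Prod.fst).Nodup
instance (set_one : List (String × Int)) (set_two : List (String × Int)) : Decidable (Pre_unionForJaccard set_one set_two) := by unfold Pre_unionForJaccard; infer_instance
def pvWitness_unionForJaccard : (List (String × Int)) × (List (String × Int)) :=
  ([("a", 1), ("c", 4)], [("a", 2), ("b", 3)])
def Spec_unionForJaccard (set_one : List (String × Int)) (set_two : List (String × Int)) (out : Int) : Prop := out = unionForJaccard_alt set_one set_two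
instance (set_one : List (String × Int)) (set_two : List (String × Int)) (out : Int) : Decidable (Spec_unionForJaccard set_one set_two out) := by unfold Spec_unionForJaccard; infer_instance

-- ===== CLAIM (what is proved, stated in full; the proofs are below) =====
def Claim_equal_unionForJaccard : Prop := ∀ (set_one : List (String × Int)) (set_two : List (String × Int)), Dom_unionForJaccard set_one set_two → Pre_unionForJaccard set_one set_two → Spec_unionForJaccard set_one set_two (unionForJaccard set_one set_two)

-- ===== LEMMAS AND PROOFS =====

-- find? is blind to filtered-out entries at a different key
theorem find?_filter_ne {ν : Type} (l : List (String × ν)) {w w' : String} (h : w' ≠ w) :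
    List.find? (fun p => p.1 == w') (l.filter (fun p => !(p.1 == w)))
      = List.find? (fun p => p.1 == w') l := by
  induction l with
  | nil => rfl
  | cons p t ih =>
    by_cases hw : p.1 = w
    · have h1 : (!(p.1 == w)) = false := by simp [hw]
      have h2 : (p.1 == w') = false := by
        simp only [beq_eq_false_iff_ne, ne_eq, hw]
        exact fun he => h he.symm
      rw [List.filter_cons]
      simp only [h1, Bool.false_eq_true, if_false]
      rw [List.find?_cons, h2, ih]
    · have h1 : (!(p.1 == w)) = true := by simp [hw]
      rw [List.filter_cons]
      simp only [h1, if_true]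
      rw [List.find?_cons, List.find?_cons]
      cases hpq : (p.1 == w') <;> simp [ih]

-- erase only touches the erased key
theorem dict_contains_erase_of_ne {ν : Type} (d : PySem.Dict String ν) {w w' : String} (h : w' ≠ w) :
    (d.erase w).contains w' = d.contains w' := by
  simp only [PySem.Dict.erase, PySem.Dict.contains]
  rw [Bool.eq_iff_iff]
  simp only [List.any_eq_true, List.mem_filter]
  constructor
  · rintro ⟨p, ⟨hp, _⟩, he⟩; exact ⟨p, hp, he⟩
  · rintro ⟨p, hp, he⟩
    refine ⟨p, ⟨hp, ?_⟩, he⟩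
    simp at he ⊢
    exact fun hw => h (hw ▸ he).symm

theorem dict_getD_erase_of_ne {ν : Type} (d : PySem.Dict String ν) {w w' : String} (h : w' ≠ w) (dflt : ν) :
    (d.erase w).getD w' dflt = d.getD w' dflt := by
  simp only [PySem.Dict.getD, PySem.Dict.get?, PySem.Dict.erase, find?_filter_ne d.items h]

-- A's first loop, characterised: it adds, for each key w of ws in order, the max with d's value
-- when w is a key of d and f w otherwise, and it ends with d stripped of the keys in ws.
theorem loopA_spec (f : String → Int) (ws : List String) (hnd : ws.Nodup) (res : Int)
    (d : PySem.Dict String Int) :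
    ws.foldl
      (fun (s : Int × PySem.Dict String Int) w =>
        if s.2.contains w then
          (s.1 + max (f w) (s.2.getD w 0), s.2.erase w)
        else
          (s.1 + f w, s.2))
      (res, d)
    = (res + (ws.map (fun w => if d.contains w then max (f w) (d.getD w 0) else f w)).sum,
       PySem.Dict.mk (d.items.filter (fun p => !ws.contains p.1))) := by
  induction ws generalizing res d with
  | nil => simp
  | cons w t ih =>
    have hw : w ∉ t := (List.nodup_cons.mp hnd).1
    have hnt : t.Nodup := (List.nodup_cons.mp hnd).2
    by_cases hc : d.contains w = true
    · rw [List.foldl_cons]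
      simp only [hc, if_true]
      rw [ih hnt, Prod.mk.injEq]
      refine ⟨?_, ?_⟩
      · simp only [List.map_cons, List.sum_cons, hc, if_true]
        have : ∀ w' ∈ t, (if (d.erase w).contains w' then max (f w') ((d.erase w).getD w' 0) else f w')
            = (if d.contains w' then max (f w') (d.getD w' 0) else f w') := by
          intro w' hw'
          have hne : w' ≠ w := fun h => hw (h ▸ hw')
          rw [dict_contains_erase_of_ne d hne, dict_getD_erase_of_ne d hne]
        rw [List.map_congr_left this]; ring
      · simp only [PySem.Dict.erase, List.filter_filter]
        congr 1
        refine List.filter_congr (fun p _ => ?_)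
        by_cases hp : p.1 = w <;> simp [hp]
    · rw [List.foldl_cons]
      rw [if_neg hc, ih hnt, Prod.mk.injEq]
      refine ⟨?_, ?_⟩
      · simp only [List.map_cons, List.sum_cons, hc, Bool.false_eq_true, if_false]
        ring
      · congr 1
        refine List.filter_congr (fun p hp => ?_)
        have hne : p.1 ≠ w := by
          intro h
          have : d.contains w = true := by
            simp only [PySem.Dict.contains, List.any_eq_true]
            exact ⟨p, hp, by simp [h]⟩
          simp [this] at hc
        simp [hne]

-- A's second loop: summing d[w] over the (distinct) keys of d is summing d's values.
theorem loopA2_spec (d : PySem.Dict String Int) (hnd : d.keys.Nodup) (res : Int) :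
    d.keys.foldl (fun r w => r + d.getD w 0) res = res + d.values.sum := by
  rw [PySem.List.foldl_add, PySem.Dict.values_eq_map_keys d hnd 0]

-- B's loop, characterised: it subtracts, for each pair p of l in order, min p.2 (d's value at p.1)
-- when p.1 is a key of d and nothing otherwise.
theorem loopB_spec (l : List (String × Int)) (hnd : (l.map Prod.fst).Nodup) (t : Int)
    (d : PySem.Dict String Int) :
    l.foldl
      (fun (s : Int × PySem.Dict String Int) p =>
        if s.2.contains p.1 then
          (s.1 - min p.2 (s.2.getD p.1 0), s.2.erase p.1)
        else
          s)
      (t, d)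
    = (t - (l.map (fun p => if d.contains p.1 then min p.2 (d.getD p.1 0) else 0)).sum,
       PySem.Dict.mk (d.items.filter (fun q => !(l.map Prod.fst).contains q.1))) := by
  induction l generalizing t d with
  | nil => simp
  | cons p tl ih =>
    have hmap : (List.map Prod.fst (p :: tl)) = p.1 :: tl.map Prod.fst := rfl
    have hw : p.1 ∉ tl.map Prod.fst := by
      rw [hmap] at hnd; exact (List.nodup_cons.mp hnd).1
    have hnt : (tl.map Prod.fst).Nodup := by
      rw [hmap] at hnd; exact (List.nodup_cons.mp hnd).2
    by_cases hc : d.contains p.1 = true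
    · rw [List.foldl_cons]
      simp only [hc, if_true]
      rw [ih hnt, Prod.mk.injEq]
      refine ⟨?_, ?_⟩
      · simp only [List.map_cons, List.sum_cons, hc, if_true]
        have : ∀ q ∈ tl, (if (d.erase p.1).contains q.1 then min q.2 ((d.erase p.1).getD q.1 0) else 0)
            = (if d.contains q.1 then min q.2 (d.getD q.1 0) else 0) := by
          intro q hq
          have hne : q.1 ≠ p.1 := fun h => hw (h ▸ List.mem_map.mpr ⟨q, hq, rfl⟩)
          rw [dict_contains_erase_of_ne d hne, dict_getD_erase_of_ne d hne]
        rw [List.map_congr_left this]; ring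
      · simp only [PySem.Dict.erase, List.filter_filter, hmap]
        congr 1
        refine List.filter_congr (fun q _ => ?_)
        by_cases hq : q.1 = p.1 <;> simp [hq, Bool.and_comm]
    · rw [List.foldl_cons]
      rw [if_neg hc, ih hnt, Prod.mk.injEq]
      refine ⟨?_, ?_⟩
      · simp only [List.map_cons, List.sum_cons, hc, Bool.false_eq_true, if_false]
        ring
      · rw [hmap]
        congr 1
        refine List.filter_congr (fun q hq => ?_)
        have hne : q.1 ≠ p.1 := by
          intro h
          have : d.contains p.1 = true := by
            simp only [PySem.Dict.contains, List.any_eq_true]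
            exact ⟨q, hq, by simp [h]⟩
          simp [this] at hc
        simp [hne]

-- splitting a sum over a list into the two filtered sums
theorem sum_map_split (ws : List String) (p : String → Bool) (f : String → Int) :
    (ws.map f).sum
    = ((ws.filter p).map f).sum + ((ws.filter (fun w => !p w)).map f).sum := by
  induction ws with
  | nil => simp
  | cons w t ih =>
    by_cases hp : p w = true <;> simp [hp, ih] <;> ring

-- an if-then-else-zero sum is a filtered sum
theorem sum_map_ite_zero (ws : List String) (p : String → Bool) (f : String → Int) :
    (ws.map (fun w => if p w then f w else 0)).sum = ((ws.filter p).map f).sum := by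
  induction ws with
  | nil => simp
  | cons w t ih =>
    by_cases hp : p w = true <;> simp [hp, ih]

-- pointwise max + min = f + g, summed (the if-branches pair up)
theorem sum_max_min (ws : List String) (c : String → Bool) (f g : String → Int) :
    (ws.map (fun w => if c w then max (f w) (g w) else f w)).sum
      + (ws.map (fun w => if c w then min (f w) (g w) else 0)).sum
    = (ws.map f).sum + (ws.map (fun w => if c w then g w else 0)).sum := by
  induction ws with
  | nil => simp
  | cons w t ih =>
    by_cases hc : c w = true
    · simp only [List.map_cons, List.sum_cons, hc, if_true]
      have : max (f w) (g w) + min (f w) (g w) = f w + g w := by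
        omega
      omega
    · simp only [List.map_cons, List.sum_cons, hc, Bool.false_eq_true, if_false]
      omega

-- two nodup lists with the same members have equal sums of a function of the element
theorem sum_map_of_nodup_of_mem_iff (l1 l2 : List String) (h1 : l1.Nodup) (h2 : l2.Nodup)
    (hm : ∀ w, w ∈ l1 ↔ w ∈ l2) (g : String → Int) :
    (l1.map g).sum = (l2.map g).sum := by
  have hperm : l1.Perm l2 := (List.perm_ext_iff_of_nodup h1 h2).mpr hm
  exact (hperm.map g).sum_eq

-- ===== VERDICT (by name: the statement is the Claim_ definition above) =====
theorem unionForJaccard_spec : Claim_equal_unionForJaccard := by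
  intro set_one set_two _ hpre
  obtain ⟨hn1, hn2⟩ := hpre
  show unionForJaccard set_one set_two = unionForJaccard_alt set_one set_two
  unfold unionForJaccard unionForJaccard_alt
  simp only [PySem.Dict.keys_mk]
  set K1 := set_one.map (fun x => x.1) with hK1
  set K2 := set_two.map (fun x => x.1) with hK2
  set d1 : PySem.Dict String Int := PySem.Dict.mk set_one with hd1
  set d2 : PySem.Dict String Int := PySem.Dict.mk set_two with hd2
  have hn1' : K1.Nodup := hn1
  have hn2' : K2.Nodup := hn2
  have hitems1 : d1.items = set_one := rfl
  have hitems2 : d2.items = set_two := rfl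
  set f : String → Int := fun w => d1.getD w 0 with hf
  set g : String → Int := fun w => d2.getD w 0 with hg
  have hcontains : ∀ w, d2.contains w = K2.contains w := by
    intro w
    rw [Bool.eq_iff_iff, List.contains_iff_mem]
    simp only [PySem.Dict.contains, List.any_eq_true, hitems2, hK2, List.mem_map]
    constructor
    · rintro ⟨p, hp, he⟩; exact ⟨p, hp, by simpa using he⟩
    · rintro ⟨p, hp, he⟩; exact ⟨p, hp, by simp [he]⟩
  -- A side
  rw [loopA_spec f K1 hn1' 0 d2]
  have hndA : (PySem.Dict.mk (d2.items.filter (fun p => !K1.contains p.1)) : PySem.Dict String Int).keys.Nodup := by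
    simp only [PySem.Dict.keys_mk]
    exact hn2'.sublist (List.Sublist.map _ List.filter_sublist)
  rw [loopA2_spec _ hndA]
  -- B side
  rw [loopB_spec set_one hn1 _ d2]
  -- the per-pair min term only depends on the key (nodup keys: d1 returns the pair's own value)
  have hpair : ∀ p ∈ set_one, (if d2.contains p.1 then min p.2 (d2.getD p.1 0) else 0)
      = (fun w => if d2.contains w then min (f w) (g w) else 0) p.1 := by
    intro p hp
    have hp' : (p.1, p.2) ∈ d1.items := by simpa [hitems1] using hp
    have hk : d1.keys.Nodup := hn1'
    have : d1.getD p.1 0 = p.2 := PySem.Dict.getD_of_mem_items d1 hp' hk 0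
    simp only [hf, hg, this]
  have hminsum : (set_one.map (fun p => if d2.contains p.1 then min p.2 (d2.getD p.1 0) else 0)).sum
      = (K1.map (fun w => if d2.contains w then min (f w) (g w) else 0)).sum := by
    rw [List.map_congr_left hpair, hK1, List.map_map]
    rfl
  rw [hminsum]
  -- values as sums over keys
  have hv1 : d1.values = K1.map f := PySem.Dict.values_eq_map_keys d1 hn1' 0
  have hv2 : d2.values = K2.map g := PySem.Dict.values_eq_map_keys d2 hn2' 0
  -- leftover d2 values = g over the keys of K2 not in K1
  have hvfilt : (PySem.Dict.mk (d2.items.filter (fun p => !K1.contains p.1)) : PySem.Dict String Int).values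
      = (K2.filter (fun w => !K1.contains w)).map g := by
    have hitems : d2.items = K2.map (fun k => (k, g k)) := by
      have := PySem.Dict.items_eq_map_keys d2 hn2' 0
      simpa [hg] using this
    show (d2.items.filter (fun p => !K1.contains p.1)).map (fun x => x.2) = _
    rw [hitems, List.filter_map, List.map_map]
    rfl
  rw [hvfilt, hv1, hv2]
  -- the common-key sums over K1 and K2 agree (both are the common keys, nodup)
  have hcommon : ((K1.filter (fun w => K2.contains w)).map g).sum
      = ((K2.filter (fun w => K1.contains w)).map g).sum := by
    refine sum_map_of_nodup_of_mem_iff _ _ (hn1'.filter _) (hn2'.filter _) (fun w => ?_) g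
    simp only [List.mem_filter, List.contains_iff_mem]
    exact ⟨fun ⟨a, b⟩ => ⟨b, a⟩, fun ⟨a, b⟩ => ⟨b, a⟩⟩
  -- assemble: rewrite the ite-sums through hcontains, then close by arithmetic
  have hA : (K1.map (fun w => if d2.contains w then max (f w) (d2.getD w 0) else f w)).sum
      = (K1.map (fun w => if K2.contains w then max (f w) (g w) else f w)).sum := by
    refine congrArg List.sum (List.map_congr_left (fun w _ => ?_))
    rw [hcontains w]
  have hB : (K1.map (fun w => if d2.contains w then min (f w) (g w) else 0)).sum
      = (K1.map (fun w => if K2.contains w then min (f w) (g w) else 0)).sum := by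
    refine congrArg List.sum (List.map_congr_left (fun w _ => ?_))
    rw [hcontains w]
  rw [hA, hB]
  have key := sum_max_min K1 (fun w => K2.contains w) f g
  have hsplit := sum_map_split K2 (fun w => K1.contains w) g
  have hz1 := sum_map_ite_zero K1 (fun w => K2.contains w) g
  rw [hz1, hcommon] at key
  omega
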